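-- pv_equiv track=rewrite | github.com/michaeljabbour/addteam | src/addteam/bootstrap_repo.py | _is_valid_repo_spec
-- ===== SOURCE A (Python) =====
-- def _is_valid_repo_spec(value: str) -> bool:
--     value = value.strip()
--     if not value or value.endswith("/"):
--         return False
--     parts = value.split("/")
--     if len(parts) not in (2, 3):
--         return False
--     return all(part.strip() for part in parts)
-- ===== SOURCE B (Python) =====
-- def _is_valid_repo_spec(value: str) -> bool:
--     slashes = 0
--     seen = False   # current '/'-segment has a non-whitespace char
--     ok = True      # every closed segment had a non-whitespace char
--     for ch in value.strip():
--         if ch == "/":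
--             slashes += 1
--             ok = ok and seen
--             seen = False
--         elif not ch.isspace():
--             seen = True
--     return ok and seen and slashes in (1, 2)
-- ===== Notes on version B (the rewrite author's own statement) =====
-- stated objective: alternative
-- what changed: Replaces strip-then-guard-then-split('/')-then-all(part.strip()) with a single left-to-right character scan over the stripped string that maintains a slash count, whether the current segment has a non-whitespace character, and whether all closed segments did; no intermediate parts list is built.
import Mathlib
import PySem

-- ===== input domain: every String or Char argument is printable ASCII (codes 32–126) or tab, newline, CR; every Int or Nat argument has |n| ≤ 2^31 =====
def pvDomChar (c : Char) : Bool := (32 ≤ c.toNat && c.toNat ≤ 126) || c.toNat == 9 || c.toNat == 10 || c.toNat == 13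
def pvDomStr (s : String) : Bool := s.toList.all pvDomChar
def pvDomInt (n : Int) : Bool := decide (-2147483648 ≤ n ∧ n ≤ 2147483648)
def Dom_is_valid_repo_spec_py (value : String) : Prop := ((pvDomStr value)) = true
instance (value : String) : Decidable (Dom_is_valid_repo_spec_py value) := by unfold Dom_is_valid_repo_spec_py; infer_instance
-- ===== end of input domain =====

-- B replaces A's strip/guards/split/all with a single left-to-right character scan maintaining
-- (slash count, current-segment-has-nonspace, all-closed-segments-ok): a one-pass alternative, same values.

-- ===== PORT A =====
def is_valid_repo_spec_py (value : String) : Bool :=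
  let v := PySem.Chars.strip value.toList
  if v.isEmpty || PySem.Chars.endswith v ['/'] then false
  else
    let parts := PySem.Chars.splitOn v ['/']
    if !(parts.length == 2 || parts.length == 3) then false
    else parts.all (fun p => !(PySem.Chars.strip p).isEmpty)

-- ===== PORT B =====
def is_valid_repo_spec_py_alt (value : String) : Bool :=
  let st := (PySem.Chars.strip value.toList).foldl
    (fun (st : Int × Bool × Bool) ch =>
      if ch = '/' then (st.1 + 1, false, st.2.2 && st.2.1)
      else if !(PySem.Chars.isspace ch) then (st.1, true, st.2.2)
      else st)
    (0, false, true)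
  st.2.2 && st.2.1 && (st.1 == 1 || st.1 == 2)

-- ===== PRECONDITION & SPEC =====
def Spec_is_valid_repo_spec_py (value : String) (out : Bool) : Prop := out = is_valid_repo_spec_py_alt value
instance (value : String) (out : Bool) : Decidable (Spec_is_valid_repo_spec_py value out) := by unfold Spec_is_valid_repo_spec_py; infer_instance

-- ===== CLAIM (what is proved, stated in full; the proofs are below) =====
def Claim_equal_is_valid_repo_spec_py : Prop := ∀ (value : String), Dom_is_valid_repo_spec_py value → Spec_is_valid_repo_spec_py value (is_valid_repo_spec_py value)

-- ===== LEMMAS AND PROOFS =====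

-- simple recursive single-character split (proof-side model of splitOn · ['/'])
def split1 : List Char → List (List Char)
  | [] => [[]]
  | c :: r =>
    if c = '/' then [] :: split1 r
    else match split1 r with
      | [] => [[c]]
      | h :: t => (c :: h) :: t

def hasNS (p : List Char) : Bool := p.any (fun c => !PySem.Chars.isspace c)

def consHead (pre : List Char) : List (List Char) → List (List Char)
  | [] => [pre]
  | h :: t => (pre ++ h) :: t

def lastSeg : List (List Char) → List Char
  | [] => []
  | [p] => p
  | _ :: q :: ps => lastSeg (q :: ps)

lemma split1_ne_nil (cs : List Char) : split1 cs ≠ [] := by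
  induction cs with
  | nil => simp [split1]
  | cons c r ih =>
    simp only [split1]
    split
    · simp
    · split <;> simp_all

lemma go_spec : ∀ (fuel : Nat) (l cur : List Char) (acc : List (List Char)),
    l.length < fuel →
    PySem.Chars.splitOn.go ['/'] fuel l cur acc = acc.reverse ++ consHead cur.reverse (split1 l) := by
  intro fuel
  induction fuel with
  | zero => intro l cur acc h; omega
  | succ n ih =>
    intro l cur acc h
    cases l with
    | nil =>
      rw [PySem.Chars.splitOn.go]
      simp only [split1, consHead, List.append_nil]
      simp [consHead]
      omega
    | cons c rest =>
      rw [PySem.Chars.splitOn.go]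
      simp only [List.length_cons] at h
      by_cases hc : c = '/'
      · subst hc
        rw [if_pos (by simp [List.isPrefixOf])]
        simp only [List.length_singleton, List.drop_succ_cons, List.drop_zero]
        rw [ih rest [] _ (by omega)]
        simp only [split1, if_pos rfl]
        rcases hne : split1 rest with _ | ⟨hd, tl⟩
        · exact absurd hne (split1_ne_nil rest)
        · simp [consHead]
      · rw [if_neg (by simp [List.isPrefixOf]; exact fun h => absurd h.symm hc)]
        rw [ih rest (c :: cur) _ (by omega)]
        simp only [split1, if_neg hc]
        rcases hne : split1 rest with _ | ⟨hd, tl⟩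
        · exact absurd hne (split1_ne_nil rest)
        · simp [consHead]

lemma splitOn_eq_split1 (cs : List Char) : PySem.Chars.splitOn cs ['/'] = split1 cs := by
  unfold PySem.Chars.splitOn
  rw [go_spec (cs.length + 1) cs [] [] (by omega)]
  rcases hne : split1 cs with _ | ⟨hd, tl⟩
  · exact absurd hne (split1_ne_nil cs)
  · simp [consHead]


-- stripping a segment leaves it nonempty iff it has a non-whitespace char
lemma strip_isEmpty (p : List Char) : (PySem.Chars.strip p).isEmpty = !hasNS p := by
  unfold PySem.Chars.strip PySem.Chars.rstrip PySem.Chars.lstrip hasNS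
  induction p with
  | nil => simp
  | cons c r ih =>
    by_cases hc : PySem.Chars.isspace c = true
    · simp [hc, ih]
    · simp only [List.any_cons, hc, Bool.not_false, Bool.true_or, Bool.not_true]
      rw [List.dropWhile_cons_of_neg (by simp [hc])]
      rw [List.isEmpty_eq_false_iff_exists_mem]
      have hne : List.dropWhile PySem.Chars.isspace ((c :: r).reverse) ≠ [] := by
        rw [Ne, List.dropWhile_eq_nil_iff]
        push Not
        exact ⟨c, by simp, by simp [hc]⟩
      rcases List.exists_mem_of_ne_nil _ hne with ⟨x, hx⟩
      exact ⟨x, by simpa using hx⟩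

-- the state function of B's fold, phrased on the parts list
def F (n : Int) (b k : Bool) : List (List Char) → Int × Bool × Bool
  | [] => (n, b, k)
  | [p] => (n, b || hasNS p, k)
  | p :: q :: ps => F (n + 1) false (k && (b || hasNS p)) (q :: ps)

lemma fold_eq_F (cs : List Char) : ∀ (n : Int) (b k : Bool),
    cs.foldl
      (fun (st : Int × Bool × Bool) ch =>
        if ch = '/' then (st.1 + 1, false, st.2.2 && st.2.1)
        else if !(PySem.Chars.isspace ch) then (st.1, true, st.2.2)
        else st)
      (n, b, k) = F n b k (split1 cs) := by
  induction cs with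
  | nil => intro n b k; simp [split1, F, hasNS]
  | cons c rest ih =>
    intro n b k
    simp only [List.foldl_cons]
    by_cases hc : c = '/'
    · subst hc
      simp only [if_pos rfl]
      rw [ih]
      simp only [split1, if_pos rfl]
      rcases hne : split1 rest with _ | ⟨hd, tl⟩
      · exact absurd hne (split1_ne_nil rest)
      · simp [F, hasNS]
    · rw [if_neg hc, ih]
      simp only [split1, if_neg hc]
      rcases hne : split1 rest with _ | ⟨hd, tl⟩
      · exact absurd hne (split1_ne_nil rest)
      · by_cases hs : PySem.Chars.isspace c = true
        · have hns : hasNS (c :: hd) = hasNS hd := by simp [hasNS, hs]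
          simp only [hs, Bool.not_true, Bool.false_eq_true, if_false]
          cases tl <;> simp [F, hns]
        · have hns : hasNS (c :: hd) = true := by simp [hasNS, hs]
          simp only [hs, Bool.not_false, if_true]
          cases tl <;> simp [F, hns]

-- F from the canonical start state, explicitly
lemma F_spec : ∀ (parts : List (List Char)) (n : Int) (k : Bool), parts ≠ [] →
    F n false k parts =
      (n + parts.length - 1, hasNS (lastSeg parts), k && (parts.dropLast.all hasNS)) := by
  intro parts
  induction parts with
  | nil => intro n k h; exact absurd rfl h
  | cons p ps ih =>
    intro n k _
    cases ps with
    | nil => simp [F, lastSeg]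
    | cons q qs =>
      show F (n + 1) false (k && (false || hasNS p)) (q :: qs) = _
      rw [ih (n + 1) _ (by simp)]
      refine Prod.ext ?_ (Prod.ext ?_ ?_)
      · simp only [List.length_cons]; push_cast; ring
      · simp [lastSeg]
      · simp only [List.dropLast_cons_of_ne_nil (by simp : (q : List Char) :: qs ≠ []),
          List.all_cons, Bool.false_or]
        simp [Bool.and_assoc]

-- decomposition of all into dropLast and last segment
lemma all_decomp : ∀ (parts : List (List Char)), parts ≠ [] →
    parts.all hasNS = (parts.dropLast.all hasNS && hasNS (lastSeg parts)) := by
  intro parts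
  induction parts with
  | nil => intro h; exact absurd rfl h
  | cons p ps ih =>
    intro _
    cases ps with
    | nil => simp [lastSeg]
    | cons q qs =>
      rw [List.all_cons, ih (by simp),
        List.dropLast_cons_of_ne_nil (by simp : (q : List Char) :: qs ≠ []), List.all_cons]
      have hls : lastSeg (p :: q :: qs) = lastSeg (q :: qs) := rfl
      rw [hls, Bool.and_assoc]

lemma split1_append_slash_len (cs : List Char) : 2 ≤ (split1 (cs ++ ['/'])).length := by
  induction cs with
  | nil => simp [split1]
  | cons c cs ih =>
    simp only [List.cons_append, split1]
    split
    · have := split1_ne_nil (cs ++ ['/'])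
      simp only [List.length_cons]
      have : (split1 (cs ++ ['/'])).length ≠ 0 := by simpa [List.length_eq_zero_iff] using this
      omega
    · rcases hne : split1 (cs ++ ['/']) with _ | ⟨hd, tl⟩
      · exact absurd hne (split1_ne_nil _)
      · rw [hne] at ih
        simpa using ih

lemma split1_append_slash_last (cs : List Char) : lastSeg (split1 (cs ++ ['/'])) = [] := by
  induction cs with
  | nil => simp [split1, lastSeg]
  | cons c cs ih =>
    simp only [List.cons_append, split1]
    split
    · rcases hne : split1 (cs ++ ['/']) with _ | ⟨hd, tl⟩
      · exact absurd hne (split1_ne_nil _)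
      · rw [hne] at ih; simpa [lastSeg] using ih
    · rcases hne : split1 (cs ++ ['/']) with _ | ⟨hd, tl⟩
      · exact absurd hne (split1_ne_nil _)
      · have hlen := split1_append_slash_len cs
        rw [hne] at ih hlen
        cases tl with
        | nil => simp at hlen
        | cons t ts => simpa [lastSeg] using ih

-- length translation for B's final integer comparison
lemma len_beq (m : Nat) : ((((m:Int) - 1 == 1) : Bool) || ((m:Int) - 1 == 2)) = ((m == 2) || (m == 3)) := by
  have h1 : ((m:Int) - 1 == 1) = (m == 2) := by by_cases h : m = 2 <;> simp [h] <;> omega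
  have h2 : ((m:Int) - 1 == 2) = (m == 3) := by by_cases h : m = 3 <;> simp [h] <;> omega
  rw [h1, h2]

-- common closed form of both ports
lemma alt_closed (value : String) :
    is_valid_repo_spec_py_alt value =
      (((split1 (PySem.Chars.strip value.toList)).all hasNS)
        && (((split1 (PySem.Chars.strip value.toList)).length == 2)
            || ((split1 (PySem.Chars.strip value.toList)).length == 3))) := by
  unfold is_valid_repo_spec_py_alt
  rw [fold_eq_F, F_spec _ _ _ (split1_ne_nil _)]
  simp only [zero_add]
  rw [all_decomp _ (split1_ne_nil _), len_beq]
  cases hd : (split1 (PySem.Chars.strip value.toList)).dropLast.all hasNS <;>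
  cases hl : hasNS (lastSeg (split1 (PySem.Chars.strip value.toList))) <;> simp

lemma a_closed (value : String) :
    is_valid_repo_spec_py value =
      (((split1 (PySem.Chars.strip value.toList)).all hasNS)
        && (((split1 (PySem.Chars.strip value.toList)).length == 2)
            || ((split1 (PySem.Chars.strip value.toList)).length == 3))) := by
  unfold is_valid_repo_spec_py
  simp only [splitOn_eq_split1]
  by_cases he : (PySem.Chars.strip value.toList).isEmpty = true
  · rw [List.isEmpty_iff] at he
    rw [he]
    simp [split1]
  · by_cases hs : PySem.Chars.endswith (PySem.Chars.strip value.toList) ['/'] = true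
    · rw [if_pos (by simp [he, hs])]
      obtain ⟨t, ht⟩ := (PySem.Chars.endswith_iff _ _).mp hs
      have hlast : lastSeg (split1 (PySem.Chars.strip value.toList)) = [] := by
        rw [← ht]; exact split1_append_slash_last t
      rw [all_decomp _ (split1_ne_nil _), hlast]
      simp [hasNS]
    · rw [if_neg (by simp [he, hs])]
      have hall : (split1 (PySem.Chars.strip value.toList)).all (fun p => !(PySem.Chars.strip p).isEmpty)
          = (split1 (PySem.Chars.strip value.toList)).all hasNS := by
        simp only [strip_isEmpty, Bool.not_not]
      cases hlc : (((split1 (PySem.Chars.strip value.toList)).length == 2)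
            || ((split1 (PySem.Chars.strip value.toList)).length == 3)) <;>
        simp [hall]

-- ===== VERDICT (by name: the statement is the Claim_ definition above) =====
theorem is_valid_repo_spec_py_spec : Claim_equal_is_valid_repo_spec_py := by
  intro value _
  unfold Spec_is_valid_repo_spec_py
  rw [a_closed, alt_closed]
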